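-- pv_equiv track=rewrite | github.com/Mattbusel/srfm-lab | tools/regime_calendar.py | _consecutive_runs
-- ===== SOURCE A (Python) =====
-- def _consecutive_runs(monthly: dict):
--     """Find BEAR periods > 30 bars (hours) consecutive."""
--     # monthly is {(year,month): regime_short}
--     sorted_keys = sorted(monthly)
--     runs = []
--     current_regime = None
--     current_start = None
--     current_count = 0
--     for ym in sorted_keys:
--         r = monthly[ym]
--         if r == current_regime:
--             current_count += 1
--         else:
--             if current_regime == "BER" and current_count >= 2:
--                 runs.append((current_start, ym, current_count))
--             current_regime = r
--             current_start = ym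
--             current_count = 1
--     if current_regime == "BER" and current_count >= 2:
--         runs.append((current_start, sorted_keys[-1] if sorted_keys else None, current_count))
--     return runs
-- ===== SOURCE B (Python) =====
-- def _consecutive_runs(monthly: dict):
--     """Find BEAR periods > 30 bars (hours) consecutive."""
--     keys = sorted(monthly)
--     n = len(keys)
--     runs = []
--     i = 0
--     while i < n:
--         r = monthly[keys[i]]
--         j = i + 1
--         while j < n and monthly[keys[j]] == r:
--             j += 1
--         if r == "BER" and j - i >= 2:
--             end = keys[j] if j < n else keys[j - 1]
--             runs.append((keys[i], end, j - i))
--         i = j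
--     return runs
-- ===== Notes on version B (the rewrite author's own statement) =====
-- stated objective: alternative
-- what changed: A is an element-wise state machine carrying (current_regime, start, count) through every key with a trailing flush; B is a two-pointer scan that consumes one whole equal-regime group per outer step and emits the run immediately, with the lookahead key as the end boundary.
import Mathlib
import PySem

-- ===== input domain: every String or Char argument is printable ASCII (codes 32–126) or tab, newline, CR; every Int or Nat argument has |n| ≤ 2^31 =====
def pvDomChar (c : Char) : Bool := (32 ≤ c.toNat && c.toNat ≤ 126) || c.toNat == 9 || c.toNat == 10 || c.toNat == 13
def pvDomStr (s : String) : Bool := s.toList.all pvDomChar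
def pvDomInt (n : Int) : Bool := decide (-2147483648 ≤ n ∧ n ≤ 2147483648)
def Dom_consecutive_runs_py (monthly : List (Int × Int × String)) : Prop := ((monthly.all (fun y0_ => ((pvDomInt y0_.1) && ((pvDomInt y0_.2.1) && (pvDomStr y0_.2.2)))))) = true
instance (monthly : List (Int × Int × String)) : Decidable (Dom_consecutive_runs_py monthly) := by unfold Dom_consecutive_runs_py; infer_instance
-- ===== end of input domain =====

-- B replaces A's element-wise regime state machine by a two-pointer scan consuming one
-- equal-regime group per step (alternative decomposition; same asymptotic cost).


-- Both ports read the dict argument through PySem.Dict.ofList (Python dict semantics: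
-- duplicate keys overwrite in place), then work on the sorted key list.
def pvMonthlyDict (monthly : List (Int × Int × String)) : PySem.Dict (Int × Int) String :=
  PySem.Dict.ofList (monthly.map (fun t => ((t.1, t.2.1), t.2.2)))

-- ===== PORT A =====
-- transliteration of A: sorted(monthly), then a fold carrying
-- (current_regime, current_start, current_count, runs), then the trailing flush.
-- current_start's initial None is never read (the flush needs count ≥ 2), so it is (0,0)
-- here; likewise sorted_keys[-1] in the flush is only evaluated with a nonempty key list.
def consecutive_runs_py (monthly : List (Int × Int × String)) : List ((Int × Int) × (Int × Int) × Int) :=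
  let d := pvMonthlyDict monthly
  let sorted_keys := PySem.List.sorted2 d.keys (fun k => k.1) (fun k => k.2)
  let st := sorted_keys.foldl
    (fun (st : Option String × (Int × Int) × Int × List ((Int × Int) × (Int × Int) × Int)) ym =>
      let r := d.getD ym ""
      if some r == st.1 then
        (st.1, st.2.1, st.2.2.1 + 1, st.2.2.2)
      else
        let runs' := if st.1 == some "BER" && decide (2 ≤ st.2.2.1) then
            st.2.2.2 ++ [(st.2.1, ym, st.2.2.1)] else st.2.2.2
        (some r, ym, 1, runs'))
    (none, (0, 0), 0, [])
  if st.1 == some "BER" && decide (2 ≤ st.2.2.1) then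
    st.2.2.2 ++ [(st.2.1, sorted_keys.getLastD (0, 0), st.2.2.1)]
  else st.2.2.2

-- ===== PORT B =====
-- transliteration of B's outer while-loop: one recursive step per equal-regime group;
-- the inner 'while j < n and monthly[keys[j]] == r' scan is the takeWhile/dropWhile split
-- of the suffix, j - i is 1 + same.length, keys[j] is the head of the remainder and
-- keys[j-1] the group's last key.
def pvAltGo (g : (Int × Int) → String) : List (Int × Int) → List ((Int × Int) × (Int × Int) × Int)
  | [] => []
  | k :: rest =>
    let r := g k
    let same := rest.takeWhile (fun k' => g k' == r)
    let others := rest.dropWhile (fun k' => g k' == r)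
    let cnt : Int := 1 + same.length
    let tail := pvAltGo g others
    if r == "BER" && decide (2 ≤ cnt) then
      (k, (match others with | [] => same.getLastD k | k' :: _ => k'), cnt) :: tail
    else tail
  termination_by ks => ks.length
  decreasing_by
    simp only [List.length_cons]
    exact Nat.lt_succ_of_le (List.length_dropWhile_le _ _)

def consecutive_runs_py_alt (monthly : List (Int × Int × String)) : List ((Int × Int) × (Int × Int) × Int) :=
  let d := pvMonthlyDict monthly
  pvAltGo (fun ym => d.getD ym "") (PySem.List.sorted2 d.keys (fun k => k.1) (fun k => k.2))

-- ===== PRECONDITION & SPEC =====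
def Spec_consecutive_runs_py (monthly : List (Int × Int × String)) (out : List ((Int × Int) × (Int × Int) × Int)) : Prop := out = consecutive_runs_py_alt monthly
instance (monthly : List (Int × Int × String)) (out : List ((Int × Int) × (Int × Int) × Int)) : Decidable (Spec_consecutive_runs_py monthly out) := by unfold Spec_consecutive_runs_py; infer_instance

-- ===== CLAIM (what is proved, stated in full; the proofs are below) =====
def Claim_equal_consecutive_runs_py : Prop := ∀ (monthly : List (Int × Int × String)), Dom_consecutive_runs_py monthly → Spec_consecutive_runs_py monthly (consecutive_runs_py monthly)

-- ===== LEMMAS AND PROOFS =====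

-- A's loop step, abstracted over the lookup function g.
def pvStepA (g : (Int × Int) → String)
    (st : Option String × (Int × Int) × Int × List ((Int × Int) × (Int × Int) × Int))
    (ym : Int × Int) : Option String × (Int × Int) × Int × List ((Int × Int) × (Int × Int) × Int) :=
  let r := g ym
  if some r == st.1 then
    (st.1, st.2.1, st.2.2.1 + 1, st.2.2.2)
  else
    let runs' := if st.1 == some "BER" && decide (2 ≤ st.2.2.1) then
        st.2.2.2 ++ [(st.2.1, ym, st.2.2.1)] else st.2.2.2
    (some r, ym, 1, runs')

-- A's trailing flush, abstracted.
def pvFinishA (st : Option String × (Int × Int) × Int × List ((Int × Int) × (Int × Int) × Int))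
    (lastk : Int × Int) : List ((Int × Int) × (Int × Int) × Int) :=
  if st.1 == some "BER" && decide (2 ≤ st.2.2.1) then
    st.2.2.2 ++ [(st.2.1, lastk, st.2.2.1)]
  else st.2.2.2

-- Invariant of A's loop from a mid-run state (some r, start, cnt, runs), prev being the last
-- key already consumed: the flushed result is runs, then the current run (extended by the
-- adjacent keys still mapping to r, and emitted iff r = "BER" with total count ≥ 2), then
-- B's groups of the remainder.
lemma pv_loop_eq (g : (Int × Int) → String) (s : List (Int × Int)) :
    ∀ (r : String) (start prev : Int × Int) (cnt : Int) (runs : List ((Int × Int) × (Int × Int) × Int)),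
    pvFinishA (s.foldl (pvStepA g) (some r, start, cnt, runs)) (s.getLastD prev)
      = runs ++
        ((if r == "BER" && decide (2 ≤ cnt + ((s.takeWhile (fun k' => g k' == r)).length : Int)) then
            [(start,
              (match s.dropWhile (fun k' => g k' == r) with
               | [] => (s.takeWhile (fun k' => g k' == r)).getLastD prev
               | k' :: _ => k'),
              cnt + ((s.takeWhile (fun k' => g k' == r)).length : Int))]
          else []) ++ pvAltGo g (s.dropWhile (fun k' => g k' == r))) := by
  induction s with
  | nil =>
    intro r start prev cnt runs
    simp only [List.foldl_nil, List.takeWhile_nil, List.dropWhile_nil, List.getLastD_nil,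
      pvFinishA, pvAltGo, List.length_nil, Nat.cast_zero, add_zero, Option.some_beq_some,
      List.append_nil, Bool.and_eq_true, beq_iff_eq, decide_eq_true_eq]
    split_ifs with h
    · rfl
    · simp
  | cons x s' ih =>
    intro r start prev cnt runs
    by_cases hx : g x == r
    · -- x extends the current run
      have hx' : (some (g x) == some r) = true := by simpa using hx
      have harith : cnt + (((s'.takeWhile (fun k' => g k' == r)).length + 1 : Nat) : Int)
          = (cnt + 1) + ((s'.takeWhile (fun k' => g k' == r)).length : Int) := by
        push_cast; ring
      simp only [List.foldl_cons, pvStepA, hx', if_pos, List.takeWhile_cons, hx,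
        List.dropWhile_cons, List.getLastD_cons, List.length_cons, harith]
      exact ih r start x (cnt + 1) runs
    · -- x starts a new group
      have hx' : (some (g x) == some r) = false := by simpa using hx
      have hxb : (g x == r) = false := by simpa using hx
      simp only [List.foldl_cons, pvStepA, hx', Bool.false_eq_true, if_false,
        List.takeWhile_cons, hxb, List.dropWhile_cons, List.getLastD_cons,
        Option.some_beq_some]
      rw [ih (g x) x x 1 _]
      rw [pvAltGo]
      simp only [List.length_nil, Nat.cast_zero, add_zero]
      split_ifs <;> simp [List.append_assoc]

-- the sorted key list: either empty, or peel the first key to reach a mid-run state.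
lemma pv_main (g : (Int × Int) → String) (ks : List (Int × Int)) :
    (let st := ks.foldl (pvStepA g) (none, (0, 0), 0, []);
     if st.1 == some "BER" && decide (2 ≤ st.2.2.1) then
       st.2.2.2 ++ [(st.2.1, ks.getLastD (0, 0), st.2.2.1)]
     else st.2.2.2) = pvAltGo g ks := by
  cases ks with
  | nil =>
    show pvFinishA ((List.nil).foldl (pvStepA g) (none, (0, 0), 0, [])) ((List.nil).getLastD (0, 0))
        = pvAltGo g []
    rw [pvAltGo]
    rfl
  | cons k rest =>
    show pvFinishA ((k :: rest).foldl (pvStepA g) (none, (0, 0), 0, [])) ((k :: rest).getLastD (0, 0))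
        = pvAltGo g (k :: rest)
    rw [List.foldl_cons]
    have hstep : pvStepA g (none, (0, 0), 0, []) k = (some (g k), k, 1, []) := by
      simp [pvStepA]
    rw [hstep, List.getLastD_cons, pv_loop_eq g rest (g k) k k 1 []]
    rw [pvAltGo]
    split_ifs with h1 <;> simp

-- ===== VERDICT (by name: the statement is the Claim_ definition above) =====
theorem consecutive_runs_py_spec : Claim_equal_consecutive_runs_py := by
  intro monthly _
  unfold Spec_consecutive_runs_py consecutive_runs_py consecutive_runs_py_alt
  exact pv_main _ _
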